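-- pv_equiv track=rewrite | github.com/NilsFo/Advent-of-Code | 2025/day06/day06_part1.py | do_squid_math
-- ===== SOURCE A (Python) =====
-- def do_squid_math(values, operation):
--     result = int(values[0])
--
--     for v in values[1:]:
--         if operation == '+':
--             result += int(v)
--         elif operation == '*':
--             result *= int(v)
--
--     return result
-- ===== SOURCE B (Python) =====
-- def do_squid_math(values, operation):
--     head = int(values[0])
--     if operation == '+':
--         op = lambda a, b: a + b
--     elif operation == '*':
--         op = lambda a, b: a * b
--     else:
--         return head
--     # pairwise tree reduction: halve the list each round (correct: + and * are associative)
--     nums = [head] + [int(v) for v in values[1:]]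
--     while len(nums) > 1:
--         paired = [op(nums[i], nums[i + 1]) for i in range(0, len(nums) - 1, 2)]
--         if len(nums) % 2:
--             paired.append(nums[-1])
--         nums = paired
--     return nums[0]
-- ===== Notes on version B (the rewrite author's own statement) =====
-- stated objective: alternative
-- what changed: B replaces A's linear left fold with a pairwise tree reduction: it picks the operator once, then repeatedly combines adjacent pairs, halving the list each round until one value remains (correct because + and * are associative); an unknown operation returns int(values[0]) immediately since A's loop body is then a no-op.
import Mathlib
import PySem

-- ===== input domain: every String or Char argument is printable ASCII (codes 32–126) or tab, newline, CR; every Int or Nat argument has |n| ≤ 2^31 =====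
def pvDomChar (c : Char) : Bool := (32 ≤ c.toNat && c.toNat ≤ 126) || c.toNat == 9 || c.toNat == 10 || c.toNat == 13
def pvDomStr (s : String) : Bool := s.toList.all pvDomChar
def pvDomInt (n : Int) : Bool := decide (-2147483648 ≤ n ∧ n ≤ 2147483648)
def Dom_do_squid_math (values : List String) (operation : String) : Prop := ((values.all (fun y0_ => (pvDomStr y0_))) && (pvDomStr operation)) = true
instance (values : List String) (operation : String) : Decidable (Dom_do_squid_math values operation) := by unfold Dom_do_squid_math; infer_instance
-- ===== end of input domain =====

-- B replaces A's linear left fold with a pairwise tree reduction (pick the operator once,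
-- repeatedly combine adjacent pairs until one value remains; correct since + and * are associative).

-- int(s); Pre_ excludes the inputs where Python raises ValueError (ofStr? = none)
def pvInt (s : String) : Int := (PySem.Int.ofStr? s).getD 0

-- ===== PORT A =====
def do_squid_math (values : List String) (operation : String) : Int :=
  -- result = int(values[0])  (values[0] raising IndexError on [] is excluded by Pre_)
  let result : Int := pvInt (((PySem.List.pyGet? values 0).getD ""))
  -- for v in values[1:]: if/elif branch inside the loop
  (PySem.List.slice values (some 1) none).foldl
    (fun result v =>
      if operation = "+" then result + pvInt v
      else if operation = "*" then result * pvInt v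
      else result) result

-- ===== PORT B =====
-- one round of Source B's while loop: combine adjacent pairs, keep a trailing odd element
def pairup (op : Int → Int → Int) : List Int → List Int
  | a :: b :: rest => op a b :: pairup op rest
  | xs => xs

theorem pairup_len (op : Int → Int → Int) : ∀ (xs : List Int), (pairup op xs).length ≤ xs.length
  | [] => by simp [pairup]
  | [a] => by simp [pairup]
  | a :: b :: rest => by
      simp only [pairup, List.length_cons]
      have := pairup_len op rest
      omega

-- Source B's while loop: rounds of pairing until a single value remains
def treeReduce (op : Int → Int → Int) : List Int → Int
  | [] => 0
  | [a] => a
  | a :: b :: rest => treeReduce op (op a b :: pairup op rest)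
termination_by xs => xs.length
decreasing_by
  simp only [List.length_cons]
  have := pairup_len op rest
  omega

def do_squid_math_alt (values : List String) (operation : String) : Int :=
  let head : Int := pvInt (((PySem.List.pyGet? values 0).getD ""))
  if operation = "+" then
    treeReduce (· + ·) (head :: (PySem.List.slice values (some 1) none).map pvInt)
  else if operation = "*" then
    treeReduce (· * ·) (head :: (PySem.List.slice values (some 1) none).map pvInt)
  else head

-- ===== PRECONDITION & SPEC =====
-- exactly where Python A returns: values[0] exists and parses as int; tail elements must parse
-- only when the operation is '+' or '*' (otherwise A never calls int on them)
def Pre_do_squid_math (values : List String) (operation : String) : Prop :=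
  ((values.head?.bind PySem.Int.ofStr?).isSome = true) ∧
  ((operation = "+" ∨ operation = "*") → ∀ v ∈ values.tail, (PySem.Int.ofStr? v).isSome = true)
instance (values : List String) (operation : String) : Decidable (Pre_do_squid_math values operation) := by unfold Pre_do_squid_math; infer_instance

def pvWitness_do_squid_math : List String × String := (["3", " 7 ", "+5"], "+")

def Spec_do_squid_math (values : List String) (operation : String) (out : Int) : Prop := out = do_squid_math_alt values operation
instance (values : List String) (operation : String) (out : Int) : Decidable (Spec_do_squid_math values operation out) := by unfold Spec_do_squid_math; infer_instance

-- ===== CLAIM (what is proved, stated in full; the proofs are below) =====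
def Claim_equal_do_squid_math : Prop := ∀ (values : List String) (operation : String), Dom_do_squid_math values operation → Pre_do_squid_math values operation → Spec_do_squid_math values operation (do_squid_math values operation)

-- ===== LEMMAS AND PROOFS =====
theorem foldl_pairup (op : Int → Int → Int)
    (h : ∀ a b c, op (op a b) c = op a (op b c)) :
    ∀ (xs : List Int) (c : Int), (pairup op xs).foldl op c = xs.foldl op c
  | [], _ => rfl
  | [_], _ => rfl
  | a :: b :: rest, c => by
      simp only [pairup, List.foldl]
      rw [foldl_pairup op h rest, h]

theorem treeReduce_eq (op : Int → Int → Int)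
    (h : ∀ a b c, op (op a b) c = op a (op b c)) :
    ∀ (xs : List Int) (a : Int), treeReduce op (a :: xs) = xs.foldl op a
  | [], _ => by simp [treeReduce]
  | b :: rest, a => by
      rw [treeReduce, treeReduce_eq op h (pairup op rest) (op a b), foldl_pairup op h rest]
      rfl
termination_by xs => xs.length
decreasing_by
  simp only [List.length_cons]
  have := pairup_len op rest
  omega

theorem foldl_id (init : Int) : ∀ (xs : List String), xs.foldl (fun r _ => r) init = init
  | [] => rfl
  | _ :: rest => foldl_id init rest

-- ===== VERDICT (by name: the statement is the Claim_ definition above) =====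
theorem do_squid_math_spec : Claim_equal_do_squid_math := by
  intro values operation _dom _pre
  unfold Spec_do_squid_math do_squid_math do_squid_math_alt
  by_cases hp : operation = "+"
  · simp only [hp, if_true]
    rw [treeReduce_eq (· + ·) (fun a b c => add_assoc a b c), List.foldl_map]
  · by_cases hm : operation = "*"
    · have h1 : ¬ (("*" : String) = "+") := by decide
      simp only [hm, h1, if_false, if_true]
      rw [treeReduce_eq (· * ·) (fun a b c => mul_assoc a b c), List.foldl_map]
    · simp only [hp, hm, if_false]
      exact foldl_id _ _
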